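-- pv_equiv track=rewrite | github.com/ishitagupta09/Gfg-questions | Minimum Integer.py | minimumInteger
-- ===== SOURCE A (Python) =====
-- from typing import List
--
-- def minimumInteger(N : int, A : List[int]) -> int:
--     # code here
--     A.sort()
--     arr_sum = sum(A)
--     for i in A:
--         mini = N*i
--         if arr_sum <= mini:
--             return i
--             break
-- ===== SOURCE B (Python) =====
-- from typing import List
--
-- def minimumInteger(N : int, A : List[int]) -> int:
--     # One pass, no sort: track the smallest element i with N*i >= sum(A).
--     # (Unlike A, this does not mutate A; the equivalence is about the return value.)
--     arr_sum = sum(A)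
--     best = None
--     for x in A:
--         if arr_sum <= N * x and (best is None or x < best):
--             best = x
--     return best
-- ===== Notes on version B (the rewrite author's own statement) =====
-- stated objective: faster
-- what changed: Replaces sort-then-scan with a single unsorted pass that computes the sum and tracks the minimum element satisfying N*i >= sum(A); also B does not mutate A (A sorts it in place).
-- outside the precondition, e.g. on minimumInteger(1, [1, 2, 3]): A returns None, B returns None
import Mathlib
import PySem

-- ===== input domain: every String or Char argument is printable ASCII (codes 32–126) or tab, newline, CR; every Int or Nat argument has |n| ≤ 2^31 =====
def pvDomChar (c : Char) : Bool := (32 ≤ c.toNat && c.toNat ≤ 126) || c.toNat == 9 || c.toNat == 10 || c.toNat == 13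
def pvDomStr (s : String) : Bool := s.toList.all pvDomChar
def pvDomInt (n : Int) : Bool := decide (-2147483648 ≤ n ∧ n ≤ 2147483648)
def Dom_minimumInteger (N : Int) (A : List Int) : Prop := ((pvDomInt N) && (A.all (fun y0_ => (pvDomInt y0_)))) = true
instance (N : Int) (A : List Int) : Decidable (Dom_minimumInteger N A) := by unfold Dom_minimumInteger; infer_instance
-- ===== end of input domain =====

-- B replaces A's sort-then-scan by one unsorted pass tracking the minimal satisfying element (faster: O(n) vs O(n log n) work).
-- A sorts its argument in place; B does not — the claim is about the return value only.

-- ===== PORT A =====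
-- the 'for i in A: ... return i' scan; Python falls off the end returning None
-- when no element satisfies — that case is excluded by Pre_, here 0.
def minimumIntegerLoop (N arrSum : Int) : List Int → Int
  | [] => 0
  | i :: rest => if arrSum ≤ N * i then i else minimumIntegerLoop N arrSum rest

def minimumInteger (N : Int) (A : List Int) : Int :=
  let As := PySem.List.sorted A (fun x => x) false   -- A.sort()
  let arrSum := As.sum                               -- sum(A)
  minimumIntegerLoop N arrSum As

-- ===== PORT B =====
-- single pass: best = None; update when arr_sum <= N*x and (best is None or x < best)
def minimumIntegerAltLoop (N arrSum : Int) : Option Int → List Int → Option Int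
  | best, [] => best
  | best, x :: rest =>
      minimumIntegerAltLoop N arrSum
        (if arrSum ≤ N * x && (match best with | none => true | some b => decide (x < b)) then some x else best)
        rest

def minimumInteger_alt (N : Int) (A : List Int) : Int :=
  let arrSum := A.sum
  match minimumIntegerAltLoop N arrSum none A with
  | some b => b
  | none => 0   -- Python B returns None here; excluded by Pre_

-- ===== PRECONDITION & SPEC =====
-- Pre_ excludes the inputs where no element satisfies N*i >= sum(A): there Python A
-- (and B) fall off the loop and return None, which is not an int.
def Pre_minimumInteger (N : Int) (A : List Int) : Prop := ∃ x ∈ A, A.sum ≤ N * x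
instance (N : Int) (A : List Int) : Decidable (Pre_minimumInteger N A) := by unfold Pre_minimumInteger; infer_instance
def pvWitness_minimumInteger : Int × List Int := (2, [3, 1, 2])

def Spec_minimumInteger (N : Int) (A : List Int) (out : Int) : Prop := out = minimumInteger_alt N A
instance (N : Int) (A : List Int) (out : Int) : Decidable (Spec_minimumInteger N A out) := by unfold Spec_minimumInteger; infer_instance

-- ===== CLAIM (what is proved, stated in full; the proofs are below) =====
def Claim_equal_minimumInteger : Prop := ∀ (N : Int) (A : List Int), Dom_minimumInteger N A → Pre_minimumInteger N A → Spec_minimumInteger N A (minimumInteger N A)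

-- ===== LEMMAS AND PROOFS =====

-- A's scan is find?-with-default-0
theorem loopA_eq_find (N s : Int) (l : List Int) :
    minimumIntegerLoop N s l = ((l.find? (fun x => decide (s ≤ N * x))).getD 0) := by
  induction l with
  | nil => rfl
  | cons a t ih =>
      simp only [minimumIntegerLoop, List.find?]
      by_cases h : s ≤ N * a <;> simp [h, ih]

-- find? = head? of filter
theorem find?_eq_head?_filter (p : Int → Bool) (l : List Int) :
    l.find? p = (l.filter p).head? := by
  induction l with
  | nil => rfl
  | cons a t ih =>
      by_cases h : p a
      · rw [List.find?_cons_of_pos h, List.filter_cons_of_pos h, List.head?_cons]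
      · rw [List.find?_cons_of_neg h, List.filter_cons_of_neg h, ih]

-- B's fold computes the minimum of the satisfying elements
theorem loopB_some (N s v : Int) (l : List Int) :
    minimumIntegerAltLoop N s (some v) l =
      some ((l.filter (fun x => decide (s ≤ N * x))).foldl min v) := by
  induction l generalizing v with
  | nil => rfl
  | cons a t ih =>
      simp only [minimumIntegerAltLoop, List.filter]
      by_cases h : s ≤ N * a
      · have hstep : (if (decide (s ≤ N * a) && decide (a < v)) = true then some a else some v)
            = some (min v a) := by
          by_cases h2 : a < v
          · rw [if_pos (by simp [h, h2])]
            congr 1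
            omega
          · rw [if_neg (by simp [h2])]
            congr 1
            omega
        simp only [hstep]
        simp [h, ih, List.foldl_cons]
      · simp [h, ih]

theorem loopB_none (N s : Int) (l : List Int) :
    minimumIntegerAltLoop N s none l =
      ((l.filter (fun x => decide (s ≤ N * x))).min?) := by
  induction l with
  | nil => rfl
  | cons a t ih =>
      simp only [minimumIntegerAltLoop, List.filter]
      by_cases h : s ≤ N * a
      · simp [h, loopB_some, List.min?]
      · simp [h, ih]

theorem minimumInteger_spec' (N : Int) (A : List Int) (hPre : Pre_minimumInteger N A) :
    minimumInteger N A = minimumInteger_alt N A := by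
  obtain ⟨x0, hx0mem, hx0⟩ := hPre
  set p : Int → Bool := fun x => decide (A.sum ≤ N * x) with hp
  set As := PySem.List.sorted A (fun x => x) false with hAs
  have hperm : As.Perm A := PySem.List.sorted_perm A (fun x => x) false
  have hsumeq : As.sum = A.sum := hperm.sum_eq
  -- the filtered sorted list is nonempty
  have hx0As : x0 ∈ As := hperm.mem_iff.mpr hx0mem
  have hx0filter : x0 ∈ As.filter p := by
    refine List.mem_filter.mpr ⟨hx0As, ?_⟩
    simp [hp, hx0]
  obtain ⟨m, t, hft⟩ : ∃ m t, As.filter p = m :: t := by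
    cases hfe : As.filter p with
    | nil => rw [hfe] at hx0filter; simp at hx0filter
    | cons m t => exact ⟨m, t, rfl⟩
  -- A's side: head of the sorted filtered list
  have hA : minimumInteger N A = m := by
    simp only [minimumInteger, ← hAs, hsumeq, loopA_eq_find, ← hp,
      find?_eq_head?_filter, hft, List.head?, Option.getD]
  -- m is a minimal satisfying element
  have hmmem : m ∈ As.filter p := by rw [hft]; exact List.mem_cons_self
  have hmin : ∀ y ∈ A.filter p, m ≤ y := by
    intro y hy
    have hyAs : y ∈ As.filter p := (hperm.filter p).mem_iff.mpr hy
    -- As.filter p is pairwise ≤ (sorted), so its head m is ≤ every member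
    have hpw : (As.filter p).Pairwise (fun a b => a ≤ b) := by
      have := PySem.List.sorted_pairwise A (fun x => x) (κ := Int)
      exact List.Pairwise.filter p (by simpa [hAs] using this)
    rw [hft] at hyAs hpw
    rcases List.mem_cons.mp hyAs with h | hyt
    · exact le_of_eq h.symm
    · exact (List.pairwise_cons.mp hpw).1 y hyt
  -- B's side: min? of the unsorted filtered list
  have hx0f : x0 ∈ A.filter p := by
    refine List.mem_filter.mpr ⟨hx0mem, ?_⟩; simp [hp, hx0]
  have hmA : m ∈ A.filter p := (hperm.filter p).mem_iff.mp hmmem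
  have hB : (A.filter p).min? = some m := by
    rw [List.min?_eq_some_iff]
    exact ⟨hmA, hmin⟩
  simp only [minimumInteger_alt, loopB_none, ← hp, hB, hA]

-- ===== VERDICT (by name: the statement is the Claim_ definition above) =====
theorem minimumInteger_spec : Claim_equal_minimumInteger := by
  intro N A _ hPre
  exact minimumInteger_spec' N A hPre
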